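-- pv_equiv track=rewrite | github.com/w0lramD/ChemArticleParser | Src/IO.py | html_mark_spans
-- ===== SOURCE A (Python) =====
-- import itertools
-- from typing import Optional, List, Tuple
--
-- def html_mark_spans(text: str, spans: List[Tuple[int, int]], mark_class: Optional[str] = ''):
--     """
--     Wrap entity spans with HTML marker
--
--     Parameters
--     ----------
--     text: input text string
--     spans: input spans
--     mark_class: the class of mark tag
--
--     Returns
--     -------
--     Marked text
--     """
--     merged_spans = list(itertools.chain(*spans))
--     merged_spans = [0] + merged_spans + [len(text)]
--     splitted_str = [text[x:y] for x, y in zip(merged_spans, merged_spans[1:])]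
--     i = 1
--     while i < len(splitted_str):
--         splitted_str[i] = f'<mark class={mark_class}>{splitted_str[i]}</mark>'
--         i += 2
--     return ''.join(splitted_str)
-- ===== SOURCE B (Python) =====
-- from typing import Optional, List, Tuple
--
-- def html_mark_spans(text: str, spans: List[Tuple[int, int]], mark_class: Optional[str] = ''):
--     parts = []
--     last = 0
--     for start, end in spans:
--         parts.append(text[last:start])
--         parts.append(f'<mark class={mark_class}>{text[start:end]}</mark>')
--         last = end
--     parts.append(text[last:])
--     return ''.join(parts)
-- ===== Notes on version B (the rewrite author's own statement) =====
-- stated objective: simpler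
-- what changed: Replaces A's flatten-all-boundaries + pairwise-zip slicing + stride-2 odd-index mutation loop with a single cursor walk over the spans themselves, appending plain and marked segments as it goes.
import Mathlib
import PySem

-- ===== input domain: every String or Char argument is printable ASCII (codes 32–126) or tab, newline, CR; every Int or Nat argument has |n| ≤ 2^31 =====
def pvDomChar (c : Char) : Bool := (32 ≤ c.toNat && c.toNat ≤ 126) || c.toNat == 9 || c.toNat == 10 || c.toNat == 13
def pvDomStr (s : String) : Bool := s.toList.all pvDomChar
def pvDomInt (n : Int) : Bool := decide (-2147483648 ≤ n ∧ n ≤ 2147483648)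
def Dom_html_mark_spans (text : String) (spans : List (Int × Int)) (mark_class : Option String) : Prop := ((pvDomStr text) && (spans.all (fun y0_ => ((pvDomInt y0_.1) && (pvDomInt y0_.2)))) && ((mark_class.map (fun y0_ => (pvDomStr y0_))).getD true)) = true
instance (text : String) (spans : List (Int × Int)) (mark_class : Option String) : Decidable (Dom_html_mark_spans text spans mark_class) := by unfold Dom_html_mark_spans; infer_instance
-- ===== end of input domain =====

-- B replaces A's flatten-all-boundaries + pairwise-zip slicing + stride-2 odd-index mutation
-- loop with a single cursor walk over the spans (simpler decomposition, same cost).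

-- f-string rendering of the Optional[str] argument (None prints as 'None'); shared formatting, used by both ports
def pvFmtClass (mark_class : Option String) : String :=
  match mark_class with
  | none => "None"
  | some s => s

-- ===== PORT A =====
-- the while loop: i = 1; while i < len: splitted_str[i] = f'<mark class={mc}>{splitted_str[i]}</mark>'; i += 2
def pvAMarkLoop (mc : String) (i : Nat) (l : List String) : List String :=
  if h : i < l.length then
    pvAMarkLoop mc (i + 2) (l.set i ("<mark class=" ++ mc ++ ">" ++ l[i] ++ "</mark>"))
  else l
termination_by l.length - i
decreasing_by simp; omega

def html_mark_spans (text : String) (spans : List (Int × Int)) (mark_class : Option String) : String :=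
  let merged := spans.flatMap (fun p => [p.1, p.2])
  let merged := [(0 : Int)] ++ merged ++ [PySem.Str.len text]
  let splitted := (merged.zip (merged.drop 1)).map
    (fun p => PySem.Str.slice text (some p.1) (some p.2))
  PySem.Str.join "" (pvAMarkLoop (pvFmtClass mark_class) 1 splitted)

-- ===== PORT B =====
-- the cursor walk: for (start, end) in spans: append text[last:start]; append the marked text[start:end]; last = end
def pvBGo (text : String) (mc : String) : List (Int × Int) → Int → List String → List String
  | [], last, parts => parts ++ [PySem.Str.slice text (some last) none]
  | (s, e) :: rest, last, parts =>
      pvBGo text mc rest e (parts ++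
        [PySem.Str.slice text (some last) (some s),
         "<mark class=" ++ mc ++ ">" ++ PySem.Str.slice text (some s) (some e) ++ "</mark>"])

def html_mark_spans_alt (text : String) (spans : List (Int × Int)) (mark_class : Option String) : String :=
  PySem.Str.join "" (pvBGo text (pvFmtClass mark_class) spans 0 [])

-- ===== PRECONDITION & SPEC =====
def Spec_html_mark_spans (text : String) (spans : List (Int × Int)) (mark_class : Option String) (out : String) : Prop := out = html_mark_spans_alt text spans mark_class
instance (text : String) (spans : List (Int × Int)) (mark_class : Option String) (out : String) : Decidable (Spec_html_mark_spans text spans mark_class out) := by unfold Spec_html_mark_spans; infer_instance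

-- ===== CLAIM (what is proved, stated in full; the proofs are below) =====
def Claim_equal_html_mark_spans : Prop := ∀ (text : String) (spans : List (Int × Int)) (mark_class : Option String), Dom_html_mark_spans text spans mark_class → Spec_html_mark_spans text spans mark_class (html_mark_spans text spans mark_class)

-- ===== LEMMAS AND PROOFS =====

-- A's splitted list of segments, generalized to an arbitrary first boundary `last`
def pvSegs (text : String) (last : Int) (spans : List (Int × Int)) : List String :=
  let merged := last :: ((spans.flatMap (fun p => [p.1, p.2])) ++ [PySem.Str.len text])
  (merged.zip (merged.drop 1)).map (fun p => PySem.Str.slice text (some p.1) (some p.2))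

theorem pvSegs_nil (text : String) (last : Int) :
    pvSegs text last [] = [PySem.Str.slice text (some last) (some (PySem.Str.len text))] := by
  simp [pvSegs]

theorem pvSegs_cons (text : String) (last : Int) (s e : Int) (rest : List (Int × Int)) :
    pvSegs text last ((s, e) :: rest) =
      PySem.Str.slice text (some last) (some s) ::
      PySem.Str.slice text (some s) (some e) :: pvSegs text e rest := by
  simp [pvSegs]

-- shifting the mark loop past one element
theorem pvAMarkLoop_shift (mc : String) :
    ∀ (n i : Nat) (l : List String) (x : String), l.length - i ≤ n →
      pvAMarkLoop mc (i + 1) (x :: l) = x :: pvAMarkLoop mc i l := by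
  intro n
  induction n with
  | zero =>
    intro i l x hn
    have h : ¬ i < l.length := by omega
    rw [pvAMarkLoop, pvAMarkLoop]
    simp [h]
  | succ n ih =>
    intro i l x hn
    by_cases h : i < l.length
    · have h1 : i + 1 < (x :: l).length := by simp; omega
      conv_lhs => rw [pvAMarkLoop]
      rw [dif_pos h1]
      have hget : (x :: l)[i + 1]'h1 = l[i]'h := by simp
      rw [List.set_cons_succ, hget]
      conv_rhs => rw [pvAMarkLoop]
      rw [dif_pos h]
      rw [show i + 1 + 2 = i + 2 + 1 from by omega]
      exact ih (i + 2) _ x (by simp; omega)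
    · conv_lhs => rw [pvAMarkLoop]
      conv_rhs => rw [pvAMarkLoop]
      rw [dif_neg (show ¬ i + 1 < (x :: l).length by simp; omega), dif_neg h]

theorem pvAMarkLoop_shift' (mc : String) (i : Nat) (l : List String) (x : String) :
    pvAMarkLoop mc (i + 1) (x :: l) = x :: pvAMarkLoop mc i l :=
  pvAMarkLoop_shift mc (l.length - i) i l x le_rfl

theorem pvAMarkLoop_one_singleton (mc : String) (a : String) :
    pvAMarkLoop mc 1 [a] = [a] := by
  rw [pvAMarkLoop]; simp

theorem pvAMarkLoop_one_cons_cons (mc : String) (a b : String) (rest : List String) :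
    pvAMarkLoop mc 1 (a :: b :: rest) =
      a :: ("<mark class=" ++ mc ++ ">" ++ b ++ "</mark>") :: pvAMarkLoop mc 1 rest := by
  have h0 : pvAMarkLoop mc 1 (a :: b :: rest) = a :: pvAMarkLoop mc 0 (b :: rest) := by
    simpa using pvAMarkLoop_shift' mc 0 (b :: rest) a
  rw [h0, pvAMarkLoop]
  simp only [List.length_cons, Nat.zero_lt_succ, dite_true, List.getElem_cons_zero,
    List.set_cons_zero]
  rw [show (2 : Nat) = 1 + 1 by rfl, pvAMarkLoop_shift']

-- B's loop accumulates on the left only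
theorem pvBGo_append (text : String) (mc : String) :
    ∀ (spans : List (Int × Int)) (last : Int) (parts : List String),
      pvBGo text mc spans last parts = parts ++ pvBGo text mc spans last [] := by
  intro spans
  induction spans with
  | nil => intro last parts; simp [pvBGo]
  | cons p rest ih =>
    intro last parts
    obtain ⟨s, e⟩ := p
    rw [pvBGo, pvBGo, ih e, ih e (([] : List String) ++ _)]
    simp

-- text[last:len(text)] = text[last:]
theorem pvSlice_to_len (text : String) (last : Int) :
    PySem.Str.slice text (some last) (some (PySem.Str.len text)) =
      PySem.Str.slice text (some last) none := by
  simp only [PySem.Str.slice, PySem.Chars.slice, PySem.List.slice, PySem.Str.len,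
    PySem.List.clampIdx]
  rw [if_neg (show ¬ ((text.toList.length : Int) < 0) by omega)]
  simp

-- the marked segment list of A equals B's part list, for every cursor position
theorem pvMain (text : String) (mc : String) :
    ∀ (spans : List (Int × Int)) (last : Int),
      pvAMarkLoop mc 1 (pvSegs text last spans) = pvBGo text mc spans last [] := by
  intro spans
  induction spans with
  | nil =>
    intro last
    rw [pvSegs_nil, pvAMarkLoop_one_singleton, pvSlice_to_len, pvBGo]
    simp
  | cons p rest ih =>
    intro last
    obtain ⟨s, e⟩ := p
    rw [pvSegs_cons, pvAMarkLoop_one_cons_cons, ih e, pvBGo]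
    conv_rhs => rw [pvBGo_append]
    simp

-- ===== VERDICT (by name: the statement is the Claim_ definition above) =====
theorem html_mark_spans_spec : Claim_equal_html_mark_spans := by
  intro text spans mark_class _
  show PySem.Str.join "" (pvAMarkLoop (pvFmtClass mark_class) 1 (pvSegs text 0 spans))
      = PySem.Str.join "" (pvBGo text (pvFmtClass mark_class) spans 0 [])
  exact congrArg _ (pvMain text (pvFmtClass mark_class) spans 0)
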